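-- pv_equiv track=rewrite | github.com/Ai983/pq-filling-application | backend/app/engine/fillers/project_table_filler.py | _normalize_project_record
-- ===== SOURCE A (Python) =====
-- from typing import Any, Dict, List, Tuple
--
-- def _safe_text(value: Any) -> str:
--     if value is None:
--         return ""
--     return str(value).strip()
--
-- def _is_meaningful_value(value: Any) -> bool:
--     if value is None:
--         return False
--     return str(value).strip() != ""
--
-- def _derive_project_location(project: Dict[str, Any]) -> Any:
--     for key in ("location", "site_location"):
--         value = project.get(key)
--         if _is_meaningful_value(value):
--             return value
--
--     city = project.get("city")
--     state = project.get("state")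
--
--     city_text = _safe_text(city)
--     state_text = _safe_text(state)
--
--     if city_text and state_text:
--         return f"{city_text}, {state_text}"
--     if city_text:
--         return city_text
--     if state_text:
--         return state_text
--
--     return None
--
-- def _derive_project_value(project: Dict[str, Any]) -> Any:
--     for key in (
--         "value",
--         "project_value",
--         "contract_value",
--         "value_of_work_order",
--         "work_order_value",
--         "volume_of_work",
--     ):
--         value = project.get(key)
--         if _is_meaningful_value(value):
--             return value
--     return None
--
-- def _normalize_project_record(project: Dict[str, Any]) -> Dict[str, Any]:
--     normalized = dict(project or {})
--
--     if not _is_meaningful_value(normalized.get("project_name")):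
--         for key in ("name_of_project", "project", "work_name"):
--             if _is_meaningful_value(normalized.get(key)):
--                 normalized["project_name"] = normalized.get(key)
--                 break
--
--     if not _is_meaningful_value(normalized.get("client")):
--         for key in ("client_name", "customer"):
--             if _is_meaningful_value(normalized.get(key)):
--                 normalized["client"] = normalized.get(key)
--                 break
--
--     if not _is_meaningful_value(normalized.get("category")):
--         for key in ("type_of_work", "nature_of_work", "scope_of_work"):
--             if _is_meaningful_value(normalized.get(key)):
--                 normalized["category"] = normalized.get(key)
--                 break
--
--     if not _is_meaningful_value(normalized.get("start_date")):
--         for key in ("order_date", "commencement_date", "po_date"):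
--             if _is_meaningful_value(normalized.get(key)):
--                 normalized["start_date"] = normalized.get(key)
--                 break
--
--     if not _is_meaningful_value(normalized.get("end_date")):
--         for key in ("completion_date", "work_completion_date"):
--             if _is_meaningful_value(normalized.get(key)):
--                 normalized["end_date"] = normalized.get(key)
--                 break
--
--     if not _is_meaningful_value(normalized.get("value")):
--         derived_value = _derive_project_value(normalized)
--         if _is_meaningful_value(derived_value):
--             normalized["value"] = derived_value
--
--     if not _is_meaningful_value(normalized.get("location")):
--         derived_location = _derive_project_location(normalized)
--         if _is_meaningful_value(derived_location):
--             normalized["location"] = derived_location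
--
--     return normalized
-- ===== SOURCE B (Python) =====
-- # Inverted index: one pass over the record's items against an alias->(target, rank) map,
-- # keeping the lowest-rank meaningful value per target, instead of scanning candidate key
-- # tuples per target.
-- _ALIASES = {
--     "name_of_project": ("project_name", 0),
--     "project": ("project_name", 1),
--     "work_name": ("project_name", 2),
--     "client_name": ("client", 0),
--     "customer": ("client", 1),
--     "type_of_work": ("category", 0),
--     "nature_of_work": ("category", 1),
--     "scope_of_work": ("category", 2),
--     "order_date": ("start_date", 0),
--     "commencement_date": ("start_date", 1),
--     "po_date": ("start_date", 2),
--     "completion_date": ("end_date", 0),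
--     "work_completion_date": ("end_date", 1),
--     "project_value": ("value", 0),
--     "contract_value": ("value", 1),
--     "value_of_work_order": ("value", 2),
--     "work_order_value": ("value", 3),
--     "volume_of_work": ("value", 4),
--     "site_location": ("location", 0),
-- }
--
-- _ORDER = ("project_name", "client", "category", "start_date", "end_date", "value", "location")
--
--
-- def _normalize_project_record(project):
--     result = dict(project or {})
--
--     best = {}
--     city = None
--     state = None
--     for key, value in result.items():
--         if value is not None and str(value).strip() != "":
--             hit = _ALIASES.get(key)
--             if hit is not None:
--                 target, rank = hit
--                 if target not in best or rank < best[target][0]: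
--                     best[target] = (rank, value)
--         if key == "city":
--             city = value
--         elif key == "state":
--             state = value
--
--     for target in _ORDER:
--         current = result.get(target)
--         if current is not None and str(current).strip() != "":
--             continue
--         if target in best:
--             result[target] = best[target][1]
--         elif target == "location":
--             c = "" if city is None else str(city).strip()
--             s = "" if state is None else str(state).strip()
--             if c and s:
--                 result[target] = f"{c}, {s}"
--             elif c or s:
--                 result[target] = c or s
--     return result
-- ===== Notes on version B (the rewrite author's own statement) =====
-- stated objective: alternative
-- what changed: A scans per-target tuples of fallback keys with repeated dict lookups (and separate _derive helpers); B inverts the traversal: one pass over the record's items against a precomputed alias->(target,rank) index keeps the lowest-rank meaningful value per target (and captures city/state in the same pass), then a single pass over the target order applies the collected winners.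
import Mathlib
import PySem

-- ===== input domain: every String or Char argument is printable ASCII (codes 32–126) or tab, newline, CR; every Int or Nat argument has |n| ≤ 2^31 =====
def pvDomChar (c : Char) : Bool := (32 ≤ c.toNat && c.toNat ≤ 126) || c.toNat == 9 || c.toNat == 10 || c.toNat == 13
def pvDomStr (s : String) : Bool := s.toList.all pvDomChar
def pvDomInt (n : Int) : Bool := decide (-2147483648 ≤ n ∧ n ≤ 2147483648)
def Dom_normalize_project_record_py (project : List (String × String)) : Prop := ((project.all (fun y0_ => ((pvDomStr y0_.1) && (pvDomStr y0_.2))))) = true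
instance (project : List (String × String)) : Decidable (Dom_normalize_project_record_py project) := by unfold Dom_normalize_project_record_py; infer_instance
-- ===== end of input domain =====

-- B replaces A's per-target scans over fallback-key tuples by an inverted alias->(target,rank)
-- index: one pass over the record's items keeps the lowest-rank meaningful value per target
-- (capturing city/state in the same pass), then one pass over the target order applies the
-- winners; objective: alternative algorithm, same cost.

-- ===== PORT A =====
-- _is_meaningful_value(v)
def pyIsMeaningful (v : Option String) : Bool :=
  match v with
  | none => false
  | some s => !(PySem.Str.strip s == "")

-- _safe_text(v)
def pySafeText (v : Option String) : String :=
  match v with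
  | none => ""
  | some s => PySem.Str.strip s

-- the 'for key in (...): value = d.get(key); if meaningful: return value' loop of A's derive helpers
def pyScanKeys (d : PySem.Dict String String) : List String → Option String
  | [] => none
  | k :: ks => if pyIsMeaningful (d.get? k) then d.get? k else pyScanKeys d ks

-- _derive_project_value
def pyDeriveValue (d : PySem.Dict String String) : Option String :=
  pyScanKeys d ["value", "project_value", "contract_value", "value_of_work_order",
                "work_order_value", "volume_of_work"]

-- _derive_project_location
def pyDeriveLocation (d : PySem.Dict String String) : Option String :=
  match pyScanKeys d ["location", "site_location"] with
  | some v => some v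
  | none =>
    let cityText := pySafeText (d.get? "city")
    let stateText := pySafeText (d.get? "state")
    if !(cityText == "") && !(stateText == "") then some (cityText ++ ", " ++ stateText)
    else if !(cityText == "") then some cityText
    else if !(stateText == "") then some stateText
    else none

-- the 'for key in (...): if meaningful(d.get(key)): d[target] = d.get(key); break' loop
-- (the inserted value is the meaningful d.get(key), unwrapped with getD "")
def pyFillLoop (d : PySem.Dict String String) (target : String) : List String → PySem.Dict String String
  | [] => d
  | k :: ks => if pyIsMeaningful (d.get? k) then d.insert target ((d.get? k).getD "") else pyFillLoop d target ks

-- _normalize_project_record; 'if not meaningful: fill' written as 'if meaningful then d else fill'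
def normalize_project_record_py (project : List (String × String)) : List (String × String) :=
  let n0 := project.foldl (fun d kv => d.insert kv.1 kv.2) (PySem.Dict.empty : PySem.Dict String String)
  let n1 := if pyIsMeaningful (n0.get? "project_name") then n0 else
              pyFillLoop n0 "project_name" ["name_of_project", "project", "work_name"]
  let n2 := if pyIsMeaningful (n1.get? "client") then n1 else
              pyFillLoop n1 "client" ["client_name", "customer"]
  let n3 := if pyIsMeaningful (n2.get? "category") then n2 else
              pyFillLoop n2 "category" ["type_of_work", "nature_of_work", "scope_of_work"]
  let n4 := if pyIsMeaningful (n3.get? "start_date") then n3 else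
              pyFillLoop n3 "start_date" ["order_date", "commencement_date", "po_date"]
  let n5 := if pyIsMeaningful (n4.get? "end_date") then n4 else
              pyFillLoop n4 "end_date" ["completion_date", "work_completion_date"]
  let n6 := if pyIsMeaningful (n5.get? "value") then n5 else
              (let dv := pyDeriveValue n5
               if pyIsMeaningful dv then n5.insert "value" (dv.getD "") else n5)
  let n7 := if pyIsMeaningful (n6.get? "location") then n6 else
              (let dl := pyDeriveLocation n6
               if pyIsMeaningful dl then n6.insert "location" (dl.getD "") else n6)
  n7.items

-- ===== PORT B =====
-- the _ALIASES dict literal, as its entry list and as a dict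
def altAliasList : List (String × String × Nat) :=
  [("name_of_project", ("project_name", 0)), ("project", ("project_name", 1)),
   ("work_name", ("project_name", 2)),
   ("client_name", ("client", 0)), ("customer", ("client", 1)),
   ("type_of_work", ("category", 0)), ("nature_of_work", ("category", 1)),
   ("scope_of_work", ("category", 2)),
   ("order_date", ("start_date", 0)), ("commencement_date", ("start_date", 1)),
   ("po_date", ("start_date", 2)),
   ("completion_date", ("end_date", 0)), ("work_completion_date", ("end_date", 1)),
   ("project_value", ("value", 0)), ("contract_value", ("value", 1)),
   ("value_of_work_order", ("value", 2)), ("work_order_value", ("value", 3)),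
   ("volume_of_work", ("value", 4)),
   ("site_location", ("location", 0))]

def altAliases : PySem.Dict String (String × Nat) := PySem.Dict.mk altAliasList

def altOrder : List String :=
  ["project_name", "client", "category", "start_date", "end_date", "value", "location"]

-- 'value is not None and str(value).strip() != ""' on an optional lookup result
def altMean (o : Option String) : Bool :=
  match o with
  | none => false
  | some s => !(PySem.Str.strip s == "")

-- one iteration of B's single pass over result.items(): update best / capture city, state
def altScanStep (st : PySem.Dict String (Nat × String) × Option String × Option String)
    (kv : String × String) : PySem.Dict String (Nat × String) × Option String × Option String :=
  let best :=
    if !(PySem.Str.strip kv.2 == "") then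
      match altAliases.get? kv.1 with
      | some tr =>
        match st.1.get? tr.1 with
        | none => st.1.insert tr.1 (tr.2, kv.2)
        | some rv => if tr.2 < rv.1 then st.1.insert tr.1 (tr.2, kv.2) else st.1
      | none => st.1
    else st.1
  if kv.1 == "city" then (best, some kv.2, st.2.2)
  else if kv.1 == "state" then (best, st.2.1, some kv.2)
  else (best, st.2.1, st.2.2)

-- '"" if x is None else str(x).strip()'
def altStripOpt (o : Option String) : String :=
  match o with
  | none => ""
  | some v => PySem.Str.strip v

-- one iteration of B's pass over _ORDER
def altApply (best : PySem.Dict String (Nat × String)) (city state : Option String)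
    (res : PySem.Dict String String) (t : String) : PySem.Dict String String :=
  if altMean (res.get? t) then res
  else
    match best.get? t with
    | some rv => res.insert t rv.2
    | none =>
      if t == "location" then
        let c := altStripOpt city
        let s := altStripOpt state
        if !(c == "") && !(s == "") then res.insert t (c ++ ", " ++ s)
        else if !(c == "") || !(s == "") then res.insert t (if !(c == "") then c else s)
        else res
      else res

def normalize_project_record_py_alt (project : List (String × String)) : List (String × String) :=
  let result := project.foldl (fun d kv => d.insert kv.1 kv.2) (PySem.Dict.empty : PySem.Dict String String)
  let st := result.items.foldl altScanStep
      ((PySem.Dict.empty : PySem.Dict String (Nat × String)), (none : Option String), (none : Option String))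
  (altOrder.foldl (altApply st.1 st.2.1 st.2.2) result).items

-- ===== PRECONDITION & SPEC =====
def Spec_normalize_project_record_py (project : List (String × String)) (out : List (String × String)) : Prop := out = normalize_project_record_py_alt project
instance (project : List (String × String)) (out : List (String × String)) : Decidable (Spec_normalize_project_record_py project out) := by unfold Spec_normalize_project_record_py; infer_instance

-- ===== CLAIM (what is proved, stated in full; the proofs are below) =====
def Claim_equal_normalize_project_record_py : Prop := ∀ (project : List (String × String)), Dom_normalize_project_record_py project → Spec_normalize_project_record_py project (normalize_project_record_py project)

-- ===== LEMMAS AND PROOFS =====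

def pvIns (d : PySem.Dict String String) (kv : String × String) : PySem.Dict String String :=
  d.insert kv.1 kv.2

def chunkOf (c : Bool) (o : Option String) (t : String) : List (String × String) :=
  if c then [] else match o with | some v => [(t, v)] | none => []

def updatesOf (b : PySem.Dict String String) : List (String × String) :=
  chunkOf (pyIsMeaningful (b.get? "project_name"))
          (pyScanKeys b ["name_of_project", "project", "work_name"]) "project_name"
  ++ chunkOf (pyIsMeaningful (b.get? "client"))
          (pyScanKeys b ["client_name", "customer"]) "client"
  ++ chunkOf (pyIsMeaningful (b.get? "category"))
          (pyScanKeys b ["type_of_work", "nature_of_work", "scope_of_work"]) "category"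
  ++ chunkOf (pyIsMeaningful (b.get? "start_date"))
          (pyScanKeys b ["order_date", "commencement_date", "po_date"]) "start_date"
  ++ chunkOf (pyIsMeaningful (b.get? "end_date"))
          (pyScanKeys b ["completion_date", "work_completion_date"]) "end_date"
  ++ chunkOf (pyIsMeaningful (b.get? "value")) (pyDeriveValue b) "value"
  ++ chunkOf (pyIsMeaningful (b.get? "location")) (pyDeriveLocation b) "location"

lemma fst_chunkOf_sublist (c : Bool) (o : Option String) (t : String) :
    ((chunkOf c o t).map Prod.fst).Sublist [t] := by
  cases c <;> cases o <;> simp [chunkOf]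

lemma get?_foldl_pvIns (us : List (String × String)) (d : PySem.Dict String String)
    (x : String) (hx : x ∉ us.map Prod.fst) :
    (us.foldl pvIns d).get? x = d.get? x := by
  induction us generalizing d with
  | nil => rfl
  | cons kv rest ih =>
    simp only [List.map_cons, List.mem_cons, not_or] at hx
    simp only [List.foldl_cons]
    rw [ih _ hx.2]
    show (d.insert kv.1 kv.2).get? x = d.get? x
    rw [PySem.Dict.get?_insert]
    rw [if_neg hx.1]

lemma pyScanKeys_congr (b n : PySem.Dict String String) (ks : List String)
    (h : ∀ k ∈ ks, n.get? k = b.get? k) : pyScanKeys n ks = pyScanKeys b ks := by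
  induction ks with
  | nil => rfl
  | cons k rest ih =>
    simp only [pyScanKeys]
    rw [h k (by simp), ih (fun k hk => h k (by simp [hk]))]

lemma pyFillLoop_eq (b n : PySem.Dict String String) (t : String) (ks : List String)
    (h : ∀ k ∈ ks, n.get? k = b.get? k) :
    pyFillLoop n t ks = match pyScanKeys b ks with
                        | some v => n.insert t v
                        | none => n := by
  induction ks with
  | nil => rfl
  | cons k rest ih =>
    simp only [pyFillLoop, pyScanKeys]
    rw [h k (by simp)]
    cases hb : b.get? k with
    | none => simp [pyIsMeaningful, ih (fun k hk => h k (by simp [hk]))]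
    | some v =>
      by_cases hm : pyIsMeaningful (some v) = true
      · simp [hm]
      · simp only [Bool.not_eq_true] at hm
        simp [hm, ih (fun k hk => h k (by simp [hk]))]

lemma pyScanKeys_meaningful (b : PySem.Dict String String) (ks : List String) (v : String)
    (h : pyScanKeys b ks = some v) : pyIsMeaningful (some v) = true := by
  induction ks with
  | nil => simp [pyScanKeys] at h
  | cons k rest ih =>
    simp only [pyScanKeys] at h
    by_cases hm : pyIsMeaningful (b.get? k) = true
    · rw [if_pos hm] at h; rw [h] at hm; exact hm
    · rw [if_neg hm] at h; exact ih h

lemma dw_ne {α : Type} (p : α → Bool) (l : List α) (h : l.dropWhile p ≠ []) :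
    ∃ c ∈ l.dropWhile p, p c = false := by
  induction l with
  | nil => simp at h
  | cons a l ih =>
    by_cases hp : p a = true
    · rw [List.dropWhile_cons_of_pos hp] at h ⊢; exact ih h
    · rw [List.dropWhile_cons_of_neg hp] at h ⊢
      exact ⟨a, by simp, by simpa using hp⟩

lemma strip_eq_nil_iff (cs : List Char) :
    PySem.Chars.strip cs = [] ↔ ∀ c ∈ cs, PySem.Chars.isspace c = true := by
  unfold PySem.Chars.strip PySem.Chars.rstrip PySem.Chars.lstrip
  rw [List.reverse_eq_nil_iff, List.dropWhile_eq_nil_iff]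
  constructor
  · intro h c hc
    rcases (List.mem_append.mp (by rw [List.takeWhile_append_dropWhile] at *; exact hc :
        c ∈ cs.takeWhile PySem.Chars.isspace ++ cs.dropWhile PySem.Chars.isspace)) with h1 | h1
    · exact List.mem_takeWhile_imp h1
    · exact h c (List.mem_reverse.mpr h1)
  · intro h c hc
    have : c ∈ cs := by
      have h2 := List.mem_reverse.mp hc
      have := List.takeWhile_append_dropWhile (p := PySem.Chars.isspace) (l := cs)
      rw [← this]; exact List.mem_append_right _ h2
    exact h c this

lemma strip_mem_nonspace (cs : List Char) (h : PySem.Chars.strip cs ≠ []) :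
    ∃ c ∈ PySem.Chars.strip cs, PySem.Chars.isspace c = false := by
  unfold PySem.Chars.strip PySem.Chars.rstrip at h ⊢
  rw [ne_eq, List.reverse_eq_nil_iff] at h
  obtain ⟨c, hc, hcf⟩ := dw_ne _ _ h
  exact ⟨c, List.mem_reverse.mpr hc, hcf⟩

lemma meaningful_of_nonspace (s : String) (c : Char) (hc : c ∈ s.toList)
    (hs : PySem.Chars.isspace c = false) : pyIsMeaningful (some s) = true := by
  simp only [pyIsMeaningful, Bool.not_eq_eq_eq_not, Bool.not_true, beq_eq_false_iff_ne, ne_eq]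
  intro he
  have h2 : PySem.Chars.strip s.toList = [] := by
    rw [← PySem.Str.toList_strip, he]; rfl
  have := (strip_eq_nil_iff s.toList).mp h2 c hc
  rw [hs] at this; exact Bool.false_ne_true this

lemma meaningful_strip (s : String) (h : ¬ (PySem.Str.strip s == "") = true) :
    pyIsMeaningful (some (PySem.Str.strip s)) = true := by
  have hne : PySem.Chars.strip s.toList ≠ [] := by
    intro he
    apply h
    have h2 : (PySem.Str.strip s).toList = ([] : List Char) := by rw [PySem.Str.toList_strip, he]
    have h3 : PySem.Str.strip s = "" := by
      apply String.toList_inj.mp; rw [h2]; rfl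
    simp [h3]
  obtain ⟨c, hc, hcf⟩ := strip_mem_nonspace s.toList hne
  exact meaningful_of_nonspace _ c (by rw [PySem.Str.toList_strip]; exact hc) hcf

lemma meaningful_comma (a b : String) : pyIsMeaningful (some (a ++ ", " ++ b)) = true := by
  apply meaningful_of_nonspace _ ','
  · simp [String.toList_append]
  · decide

lemma pyDeriveLocation_meaningful (b : PySem.Dict String String) (v : String)
    (h : pyDeriveLocation b = some v) : pyIsMeaningful (some v) = true := by
  unfold pyDeriveLocation at h
  cases hscan : pyScanKeys b ["location", "site_location"] with
  | some w =>
    rw [hscan] at h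
    simp only [Option.some.injEq] at h
    rw [← h]
    exact pyScanKeys_meaningful _ _ _ hscan
  | none =>
    rw [hscan] at h
    dsimp only at h
    split_ifs at h with h1 h2 h3
    · simp only [Option.some.injEq] at h
      rw [← h]; exact meaningful_comma _ _
    · cases hcity : b.get? "city" with
      | none => rw [hcity] at h2; simp [pySafeText] at h2
      | some cs =>
        rw [hcity] at h h2
        simp only [pySafeText, Option.some.injEq] at h h2
        rw [← h]
        exact meaningful_strip cs (by simpa using h2)
    · cases hstate : b.get? "state" with
      | none => rw [hstate] at h3; simp [pySafeText] at h3
      | some ss =>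
        rw [hstate] at h h3
        simp only [pySafeText, Option.some.injEq] at h h3
        rw [← h]
        exact meaningful_strip ss (by simpa using h3)

lemma pyDeriveLocation_congr (b n : PySem.Dict String String)
    (h : ∀ k ∈ (["location", "site_location", "city", "state"] : List String), n.get? k = b.get? k) :
    pyDeriveLocation n = pyDeriveLocation b := by
  have h1 := h "location" (by simp)
  have h2 := h "site_location" (by simp)
  have h3 := h "city" (by simp)
  have h4 := h "state" (by simp)
  unfold pyDeriveLocation
  rw [pyScanKeys_congr b n ["location", "site_location"]
      (by intro k hk; fin_cases hk; exacts [h1, h2]), h3, h4]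

lemma step_eq (b n : PySem.Dict String String) (U : List (String × String)) (t : String)
    (ks : List String) (hn : n = U.foldl pvIns b) (ht : t ∉ U.map Prod.fst)
    (hk : ∀ k ∈ ks, k ∉ U.map Prod.fst) :
    (if pyIsMeaningful (n.get? t) then n else pyFillLoop n t ks)
      = (U ++ chunkOf (pyIsMeaningful (b.get? t)) (pyScanKeys b ks) t).foldl pvIns b := by
  subst hn
  rw [get?_foldl_pvIns U b t ht]
  rw [pyFillLoop_eq b _ t ks (fun k hk' => get?_foldl_pvIns U b k (hk k hk'))]
  unfold chunkOf
  by_cases hm : pyIsMeaningful (b.get? t) = true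
  · simp [hm]
  · simp only [Bool.not_eq_true] at hm
    simp only [hm, Bool.false_eq_true, if_false]
    cases pyScanKeys b ks <;> simp [List.foldl_append, pvIns]

lemma not_mem_of_sublist {x : String} {U : List (String × String)} {L : List String}
    (S : (U.map Prod.fst).Sublist L) (hx : x ∉ L) : x ∉ U.map Prod.fst :=
  fun h => hx (S.subset h)

lemma chain_eq (project : List (String × String)) :
    normalize_project_record_py project =
      ((updatesOf (project.foldl (fun d kv => d.insert kv.1 kv.2) PySem.Dict.empty)).foldl pvIns
        (project.foldl (fun d kv => d.insert kv.1 kv.2) PySem.Dict.empty)).items := by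
  unfold normalize_project_record_py
  set b := project.foldl (fun d kv => d.insert kv.1 kv.2) (PySem.Dict.empty : PySem.Dict String String) with hb
  dsimp only
  have S1 : ((chunkOf (pyIsMeaningful (b.get? "project_name")) (pyScanKeys b ["name_of_project", "project", "work_name"]) "project_name").map Prod.fst).Sublist ["project_name"] :=
    fst_chunkOf_sublist _ _ _
  have e1 := step_eq b b ([] : List (String × String)) "project_name" ["name_of_project", "project", "work_name"] rfl (by simp) (by simp)
  rw [List.nil_append] at e1
  rw [e1]
  have S2 : ((((chunkOf (pyIsMeaningful (b.get? "project_name")) (pyScanKeys b ["name_of_project", "project", "work_name"]) "project_name") ++ chunkOf (pyIsMeaningful (b.get? "client")) (pyScanKeys b ["client_name", "customer"]) "client").map Prod.fst).Sublist ["project_name", "client"]) := by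
    have h := S1.append (fst_chunkOf_sublist (pyIsMeaningful (b.get? "client")) (pyScanKeys b ["client_name", "customer"]) "client")
    simpa using h
  have e2 := step_eq b ((chunkOf (pyIsMeaningful (b.get? "project_name")) (pyScanKeys b ["name_of_project", "project", "work_name"]) "project_name").foldl pvIns b) (chunkOf (pyIsMeaningful (b.get? "project_name")) (pyScanKeys b ["name_of_project", "project", "work_name"]) "project_name") "client" ["client_name", "customer"] rfl
    (not_mem_of_sublist S1 (by decide))
    (by intro k hk; exact not_mem_of_sublist S1 (by fin_cases hk <;> decide))
  rw [e2]
  have S3 : (((((chunkOf (pyIsMeaningful (b.get? "project_name")) (pyScanKeys b ["name_of_project", "project", "work_name"]) "project_name") ++ chunkOf (pyIsMeaningful (b.get? "client")) (pyScanKeys b ["client_name", "customer"]) "client") ++ chunkOf (pyIsMeaningful (b.get? "category")) (pyScanKeys b ["type_of_work", "nature_of_work", "scope_of_work"]) "category").map Prod.fst).Sublist ["project_name", "client", "category"]) := by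
    have h := S2.append (fst_chunkOf_sublist (pyIsMeaningful (b.get? "category")) (pyScanKeys b ["type_of_work", "nature_of_work", "scope_of_work"]) "category")
    simpa using h
  have e3 := step_eq b (((chunkOf (pyIsMeaningful (b.get? "project_name")) (pyScanKeys b ["name_of_project", "project", "work_name"]) "project_name") ++ chunkOf (pyIsMeaningful (b.get? "client")) (pyScanKeys b ["client_name", "customer"]) "client").foldl pvIns b) ((chunkOf (pyIsMeaningful (b.get? "project_name")) (pyScanKeys b ["name_of_project", "project", "work_name"]) "project_name") ++ chunkOf (pyIsMeaningful (b.get? "client")) (pyScanKeys b ["client_name", "customer"]) "client") "category" ["type_of_work", "nature_of_work", "scope_of_work"] rfl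
    (not_mem_of_sublist S2 (by decide))
    (by intro k hk; exact not_mem_of_sublist S2 (by fin_cases hk <;> decide))
  rw [e3]
  have S4 : ((((((chunkOf (pyIsMeaningful (b.get? "project_name")) (pyScanKeys b ["name_of_project", "project", "work_name"]) "project_name") ++ chunkOf (pyIsMeaningful (b.get? "client")) (pyScanKeys b ["client_name", "customer"]) "client") ++ chunkOf (pyIsMeaningful (b.get? "category")) (pyScanKeys b ["type_of_work", "nature_of_work", "scope_of_work"]) "category") ++ chunkOf (pyIsMeaningful (b.get? "start_date")) (pyScanKeys b ["order_date", "commencement_date", "po_date"]) "start_date").map Prod.fst).Sublist ["project_name", "client", "category", "start_date"]) := by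
    have h := S3.append (fst_chunkOf_sublist (pyIsMeaningful (b.get? "start_date")) (pyScanKeys b ["order_date", "commencement_date", "po_date"]) "start_date")
    simpa using h
  have e4 := step_eq b ((((chunkOf (pyIsMeaningful (b.get? "project_name")) (pyScanKeys b ["name_of_project", "project", "work_name"]) "project_name") ++ chunkOf (pyIsMeaningful (b.get? "client")) (pyScanKeys b ["client_name", "customer"]) "client") ++ chunkOf (pyIsMeaningful (b.get? "category")) (pyScanKeys b ["type_of_work", "nature_of_work", "scope_of_work"]) "category").foldl pvIns b) (((chunkOf (pyIsMeaningful (b.get? "project_name")) (pyScanKeys b ["name_of_project", "project", "work_name"]) "project_name") ++ chunkOf (pyIsMeaningful (b.get? "client")) (pyScanKeys b ["client_name", "customer"]) "client") ++ chunkOf (pyIsMeaningful (b.get? "category")) (pyScanKeys b ["type_of_work", "nature_of_work", "scope_of_work"]) "category") "start_date" ["order_date", "commencement_date", "po_date"] rfl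
    (not_mem_of_sublist S3 (by decide))
    (by intro k hk; exact not_mem_of_sublist S3 (by fin_cases hk <;> decide))
  rw [e4]
  have S5 : (((((((chunkOf (pyIsMeaningful (b.get? "project_name")) (pyScanKeys b ["name_of_project", "project", "work_name"]) "project_name") ++ chunkOf (pyIsMeaningful (b.get? "client")) (pyScanKeys b ["client_name", "customer"]) "client") ++ chunkOf (pyIsMeaningful (b.get? "category")) (pyScanKeys b ["type_of_work", "nature_of_work", "scope_of_work"]) "category") ++ chunkOf (pyIsMeaningful (b.get? "start_date")) (pyScanKeys b ["order_date", "commencement_date", "po_date"]) "start_date") ++ chunkOf (pyIsMeaningful (b.get? "end_date")) (pyScanKeys b ["completion_date", "work_completion_date"]) "end_date").map Prod.fst).Sublist ["project_name", "client", "category", "start_date", "end_date"]) := by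
    have h := S4.append (fst_chunkOf_sublist (pyIsMeaningful (b.get? "end_date")) (pyScanKeys b ["completion_date", "work_completion_date"]) "end_date")
    simpa using h
  have e5 := step_eq b (((((chunkOf (pyIsMeaningful (b.get? "project_name")) (pyScanKeys b ["name_of_project", "project", "work_name"]) "project_name") ++ chunkOf (pyIsMeaningful (b.get? "client")) (pyScanKeys b ["client_name", "customer"]) "client") ++ chunkOf (pyIsMeaningful (b.get? "category")) (pyScanKeys b ["type_of_work", "nature_of_work", "scope_of_work"]) "category") ++ chunkOf (pyIsMeaningful (b.get? "start_date")) (pyScanKeys b ["order_date", "commencement_date", "po_date"]) "start_date").foldl pvIns b) ((((chunkOf (pyIsMeaningful (b.get? "project_name")) (pyScanKeys b ["name_of_project", "project", "work_name"]) "project_name") ++ chunkOf (pyIsMeaningful (b.get? "client")) (pyScanKeys b ["client_name", "customer"]) "client") ++ chunkOf (pyIsMeaningful (b.get? "category")) (pyScanKeys b ["type_of_work", "nature_of_work", "scope_of_work"]) "category") ++ chunkOf (pyIsMeaningful (b.get? "start_date")) (pyScanKeys b ["order_date", "commencement_date", "po_date"]) "start_date") "end_date" ["completion_date", "work_completion_date"]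 rfl
    (not_mem_of_sublist S4 (by decide))
    (by intro k hk; exact not_mem_of_sublist S4 (by fin_cases hk <;> decide))
  rw [e5]
  have S6 : ((((((((chunkOf (pyIsMeaningful (b.get? "project_name")) (pyScanKeys b ["name_of_project", "project", "work_name"]) "project_name") ++ chunkOf (pyIsMeaningful (b.get? "client")) (pyScanKeys b ["client_name", "customer"]) "client") ++ chunkOf (pyIsMeaningful (b.get? "category")) (pyScanKeys b ["type_of_work", "nature_of_work", "scope_of_work"]) "category") ++ chunkOf (pyIsMeaningful (b.get? "start_date")) (pyScanKeys b ["order_date", "commencement_date", "po_date"]) "start_date") ++ chunkOf (pyIsMeaningful (b.get? "end_date")) (pyScanKeys b ["completion_date", "work_completion_date"]) "end_date") ++ chunkOf (pyIsMeaningful (b.get? "value")) (pyDeriveValue b) "value").map Prod.fst).Sublist ["project_name", "client", "category", "start_date", "end_date", "value"]) := by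
    have h := S5.append (fst_chunkOf_sublist (pyIsMeaningful (b.get? "value")) (pyDeriveValue b) "value")
    simpa using h
  have hg6 : ((((((chunkOf (pyIsMeaningful (b.get? "project_name")) (pyScanKeys b ["name_of_project", "project", "work_name"]) "project_name") ++ chunkOf (pyIsMeaningful (b.get? "client")) (pyScanKeys b ["client_name", "customer"]) "client") ++ chunkOf (pyIsMeaningful (b.get? "category")) (pyScanKeys b ["type_of_work", "nature_of_work", "scope_of_work"]) "category") ++ chunkOf (pyIsMeaningful (b.get? "start_date")) (pyScanKeys b ["order_date", "commencement_date", "po_date"]) "start_date") ++ chunkOf (pyIsMeaningful (b.get? "end_date")) (pyScanKeys b ["completion_date", "work_completion_date"]) "end_date").foldl pvIns b).get? "value" = b.get? "value" :=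
    get?_foldl_pvIns _ _ _ (not_mem_of_sublist S5 (by decide))
  have hdv : pyDeriveValue ((((((chunkOf (pyIsMeaningful (b.get? "project_name")) (pyScanKeys b ["name_of_project", "project", "work_name"]) "project_name") ++ chunkOf (pyIsMeaningful (b.get? "client")) (pyScanKeys b ["client_name", "customer"]) "client") ++ chunkOf (pyIsMeaningful (b.get? "category")) (pyScanKeys b ["type_of_work", "nature_of_work", "scope_of_work"]) "category") ++ chunkOf (pyIsMeaningful (b.get? "start_date")) (pyScanKeys b ["order_date", "commencement_date", "po_date"]) "start_date") ++ chunkOf (pyIsMeaningful (b.get? "end_date")) (pyScanKeys b ["completion_date", "work_completion_date"]) "end_date").foldl pvIns b) = pyDeriveValue b := by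
    unfold pyDeriveValue
    refine pyScanKeys_congr b _ _ ?_
    intro k hk
    exact get?_foldl_pvIns _ _ _ (not_mem_of_sublist S5 (by fin_cases hk <;> decide))
  have e6 : (if pyIsMeaningful (((((((chunkOf (pyIsMeaningful (b.get? "project_name")) (pyScanKeys b ["name_of_project", "project", "work_name"]) "project_name") ++ chunkOf (pyIsMeaningful (b.get? "client")) (pyScanKeys b ["client_name", "customer"]) "client") ++ chunkOf (pyIsMeaningful (b.get? "category")) (pyScanKeys b ["type_of_work", "nature_of_work", "scope_of_work"]) "category") ++ chunkOf (pyIsMeaningful (b.get? "start_date")) (pyScanKeys b ["order_date", "commencement_date", "po_date"]) "start_date") ++ chunkOf (pyIsMeaningful (b.get? "end_date")) (pyScanKeys b ["completion_date", "work_completion_date"]) "end_date").foldl pvIns b).get? "value") = true then (((((chunkOf (pyIsMeaningful (b.get? "project_name")) (pyScanKeys b ["name_of_project", "project", "work_name"]) "project_name") ++ chunkOf (pyIsMeaningful (b.get? "client")) (pyScanKeys b ["client_name", "customer"]) "client") ++ chunkOf (pyIsMeaningful (b.get? "category")) (pyScanKeys b ["type_of_work", "nature_of_work", "scope_of_work"])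 "category") ++ chunkOf (pyIsMeaningful (b.get? "start_date")) (pyScanKeys b ["order_date", "commencement_date", "po_date"]) "start_date") ++ chunkOf (pyIsMeaningful (b.get? "end_date")) (pyScanKeys b ["completion_date", "work_completion_date"]) "end_date").foldl pvIns b
      else (if pyIsMeaningful (pyDeriveValue ((((((chunkOf (pyIsMeaningful (b.get? "project_name")) (pyScanKeys b ["name_of_project", "project", "work_name"]) "project_name") ++ chunkOf (pyIsMeaningful (b.get? "client")) (pyScanKeys b ["client_name", "customer"]) "client") ++ chunkOf (pyIsMeaningful (b.get? "category")) (pyScanKeys b ["type_of_work", "nature_of_work", "scope_of_work"]) "category") ++ chunkOf (pyIsMeaningful (b.get? "start_date")) (pyScanKeys b ["order_date", "commencement_date", "po_date"]) "start_date") ++ chunkOf (pyIsMeaningful (b.get? "end_date")) (pyScanKeys b ["completion_date", "work_completion_date"]) "end_date").foldl pvIns b)) = true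
            then ((((((chunkOf (pyIsMeaningful (b.get? "project_name")) (pyScanKeys b ["name_of_project", "project", "work_name"]) "project_name") ++ chunkOf (pyIsMeaningful (b.get? "client")) (pyScanKeys b ["client_name", "customer"]) "client") ++ chunkOf (pyIsMeaningful (b.get? "category")) (pyScanKeys b ["type_of_work", "nature_of_work", "scope_of_work"]) "category") ++ chunkOf (pyIsMeaningful (b.get? "start_date")) (pyScanKeys b ["order_date", "commencement_date", "po_date"]) "start_date") ++ chunkOf (pyIsMeaningful (b.get? "end_date")) (pyScanKeys b ["completion_date", "work_completion_date"]) "end_date").foldl pvIns b).insert "value" ((pyDeriveValue ((((((chunkOf (pyIsMeaningful (b.get? "project_name")) (pyScanKeys b ["name_of_project", "project", "work_name"]) "project_name") ++ chunkOf (pyIsMeaningful (b.get? "client")) (pyScanKeys b ["client_name", "customer"]) "client") ++ chunkOf (pyIsMeaningful (b.get? "category")) (pyScanKeys b ["type_of_work", "nature_of_work", "scope_of_work"]) "category") ++ chunkOf (pyIsMeaningful (b.get? "start_date")) (pyScanKeys b ["order_date", "commencement_date", "po_date"]) "start_date") ++ chunkOf (pyIsMeaningful (b.get? "end_date")) (pyScanKeys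 b ["completion_date", "work_completion_date"]) "end_date").foldl pvIns b)).getD "")
            else (((((chunkOf (pyIsMeaningful (b.get? "project_name")) (pyScanKeys b ["name_of_project", "project", "work_name"]) "project_name") ++ chunkOf (pyIsMeaningful (b.get? "client")) (pyScanKeys b ["client_name", "customer"]) "client") ++ chunkOf (pyIsMeaningful (b.get? "category")) (pyScanKeys b ["type_of_work", "nature_of_work", "scope_of_work"]) "category") ++ chunkOf (pyIsMeaningful (b.get? "start_date")) (pyScanKeys b ["order_date", "commencement_date", "po_date"]) "start_date") ++ chunkOf (pyIsMeaningful (b.get? "end_date")) (pyScanKeys b ["completion_date", "work_completion_date"]) "end_date").foldl pvIns b))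
      = ((((((chunkOf (pyIsMeaningful (b.get? "project_name")) (pyScanKeys b ["name_of_project", "project", "work_name"]) "project_name") ++ chunkOf (pyIsMeaningful (b.get? "client")) (pyScanKeys b ["client_name", "customer"]) "client") ++ chunkOf (pyIsMeaningful (b.get? "category")) (pyScanKeys b ["type_of_work", "nature_of_work", "scope_of_work"]) "category") ++ chunkOf (pyIsMeaningful (b.get? "start_date")) (pyScanKeys b ["order_date", "commencement_date", "po_date"]) "start_date") ++ chunkOf (pyIsMeaningful (b.get? "end_date")) (pyScanKeys b ["completion_date", "work_completion_date"]) "end_date") ++ chunkOf (pyIsMeaningful (b.get? "value")) (pyDeriveValue b) "value").foldl pvIns b := by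
    rw [hg6, hdv]
    unfold chunkOf
    by_cases hm : pyIsMeaningful (b.get? "value") = true
    · simp [hm]
    · simp only [Bool.not_eq_true] at hm
      cases hv : pyDeriveValue b with
      | none => simp [pyIsMeaningful]
      | some w =>
        have hv' : pyScanKeys b ["value", "project_value", "contract_value", "value_of_work_order", "work_order_value", "volume_of_work"] = some w := hv
        have hmw := pyScanKeys_meaningful _ _ _ hv'
        simp [hm, hmw, List.foldl_append, pvIns]
  rw [e6]
  have hg7 : (((((((chunkOf (pyIsMeaningful (b.get? "project_name")) (pyScanKeys b ["name_of_project", "project", "work_name"]) "project_name") ++ chunkOf (pyIsMeaningful (b.get? "client")) (pyScanKeys b ["client_name", "customer"]) "client") ++ chunkOf (pyIsMeaningful (b.get? "category")) (pyScanKeys b ["type_of_work", "nature_of_work", "scope_of_work"]) "category") ++ chunkOf (pyIsMeaningful (b.get? "start_date")) (pyScanKeys b ["order_date", "commencement_date", "po_date"]) "start_date") ++ chunkOf (pyIsMeaningful (b.get? "end_date")) (pyScanKeys b ["completion_date", "work_completion_date"]) "end_date") ++ chunkOf (pyIsMeaningful (b.get? "value")) (pyDeriveValue b) "value").foldl pvIns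 b).get? "location" = b.get? "location" :=
    get?_foldl_pvIns _ _ _ (not_mem_of_sublist S6 (by decide))
  have hdl : pyDeriveLocation (((((((chunkOf (pyIsMeaningful (b.get? "project_name")) (pyScanKeys b ["name_of_project", "project", "work_name"]) "project_name") ++ chunkOf (pyIsMeaningful (b.get? "client")) (pyScanKeys b ["client_name", "customer"]) "client") ++ chunkOf (pyIsMeaningful (b.get? "category")) (pyScanKeys b ["type_of_work", "nature_of_work", "scope_of_work"]) "category") ++ chunkOf (pyIsMeaningful (b.get? "start_date")) (pyScanKeys b ["order_date", "commencement_date", "po_date"]) "start_date") ++ chunkOf (pyIsMeaningful (b.get? "end_date")) (pyScanKeys b ["completion_date", "work_completion_date"]) "end_date") ++ chunkOf (pyIsMeaningful (b.get? "value")) (pyDeriveValue b) "value").foldl pvIns b) = pyDeriveLocation b := by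
    refine pyDeriveLocation_congr b _ ?_
    intro k hk
    exact get?_foldl_pvIns _ _ _ (not_mem_of_sublist S6 (by fin_cases hk <;> decide))
  have e7 : (if pyIsMeaningful ((((((((chunkOf (pyIsMeaningful (b.get? "project_name")) (pyScanKeys b ["name_of_project", "project", "work_name"]) "project_name") ++ chunkOf (pyIsMeaningful (b.get? "client")) (pyScanKeys b ["client_name", "customer"]) "client") ++ chunkOf (pyIsMeaningful (b.get? "category")) (pyScanKeys b ["type_of_work", "nature_of_work", "scope_of_work"]) "category") ++ chunkOf (pyIsMeaningful (b.get? "start_date")) (pyScanKeys b ["order_date", "commencement_date", "po_date"]) "start_date") ++ chunkOf (pyIsMeaningful (b.get? "end_date")) (pyScanKeys b ["completion_date", "work_completion_date"]) "end_date") ++ chunkOf (pyIsMeaningful (b.get? "value")) (pyDeriveValue b) "value").foldl pvIns b).get? "location") = true then ((((((chunkOf (pyIsMeaningful (b.get? "project_name")) (pyScanKeys b ["name_of_project", "project", "work_name"]) "project_name") ++ chunkOf (pyIsMeaningful (b.get? "client")) (pyScanKeys b ["client_name", "customer"]) "client") ++ chunkOf (pyIsMeaningful (b.get? "category")) (pyScanKeys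 b ["type_of_work", "nature_of_work", "scope_of_work"]) "category") ++ chunkOf (pyIsMeaningful (b.get? "start_date")) (pyScanKeys b ["order_date", "commencement_date", "po_date"]) "start_date") ++ chunkOf (pyIsMeaningful (b.get? "end_date")) (pyScanKeys b ["completion_date", "work_completion_date"]) "end_date") ++ chunkOf (pyIsMeaningful (b.get? "value")) (pyDeriveValue b) "value").foldl pvIns b
      else (if pyIsMeaningful (pyDeriveLocation (((((((chunkOf (pyIsMeaningful (b.get? "project_name")) (pyScanKeys b ["name_of_project", "project", "work_name"]) "project_name") ++ chunkOf (pyIsMeaningful (b.get? "client")) (pyScanKeys b ["client_name", "customer"]) "client") ++ chunkOf (pyIsMeaningful (b.get? "category")) (pyScanKeys b ["type_of_work", "nature_of_work", "scope_of_work"]) "category") ++ chunkOf (pyIsMeaningful (b.get? "start_date")) (pyScanKeys b ["order_date", "commencement_date", "po_date"]) "start_date") ++ chunkOf (pyIsMeaningful (b.get? "end_date")) (pyScanKeys b ["completion_date", "work_completion_date"]) "end_date") ++ chunkOf (pyIsMeaningful (b.get? "value")) (pyDeriveValue b) "value").foldl pvIns b)) = true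
            then (((((((chunkOf (pyIsMeaningful (b.get? "project_name")) (pyScanKeys b ["name_of_project", "project", "work_name"]) "project_name") ++ chunkOf (pyIsMeaningful (b.get? "client")) (pyScanKeys b ["client_name", "customer"]) "client") ++ chunkOf (pyIsMeaningful (b.get? "category")) (pyScanKeys b ["type_of_work", "nature_of_work", "scope_of_work"]) "category") ++ chunkOf (pyIsMeaningful (b.get? "start_date")) (pyScanKeys b ["order_date", "commencement_date", "po_date"]) "start_date") ++ chunkOf (pyIsMeaningful (b.get? "end_date")) (pyScanKeys b ["completion_date", "work_completion_date"]) "end_date") ++ chunkOf (pyIsMeaningful (b.get? "value")) (pyDeriveValue b) "value").foldl pvIns b).insert "location" ((pyDeriveLocation (((((((chunkOf (pyIsMeaningful (b.get? "project_name")) (pyScanKeys b ["name_of_project", "project", "work_name"]) "project_name") ++ chunkOf (pyIsMeaningful (b.get? "client")) (pyScanKeys b ["client_name", "customer"]) "client") ++ chunkOf (pyIsMeaningful (b.get? "category")) (pyScanKeys b ["type_of_work", "nature_of_work", "scope_of_work"]) "category") ++ chunkOf (pyIsMeaningful (b.get? "start_date")) (pyScanKeys b ["order_date", "commencement_date", "po_date"])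 "start_date") ++ chunkOf (pyIsMeaningful (b.get? "end_date")) (pyScanKeys b ["completion_date", "work_completion_date"]) "end_date") ++ chunkOf (pyIsMeaningful (b.get? "value")) (pyDeriveValue b) "value").foldl pvIns b)).getD "")
            else ((((((chunkOf (pyIsMeaningful (b.get? "project_name")) (pyScanKeys b ["name_of_project", "project", "work_name"]) "project_name") ++ chunkOf (pyIsMeaningful (b.get? "client")) (pyScanKeys b ["client_name", "customer"]) "client") ++ chunkOf (pyIsMeaningful (b.get? "category")) (pyScanKeys b ["type_of_work", "nature_of_work", "scope_of_work"]) "category") ++ chunkOf (pyIsMeaningful (b.get? "start_date")) (pyScanKeys b ["order_date", "commencement_date", "po_date"]) "start_date") ++ chunkOf (pyIsMeaningful (b.get? "end_date")) (pyScanKeys b ["completion_date", "work_completion_date"]) "end_date") ++ chunkOf (pyIsMeaningful (b.get? "value")) (pyDeriveValue b) "value").foldl pvIns b))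
      = (((((((chunkOf (pyIsMeaningful (b.get? "project_name")) (pyScanKeys b ["name_of_project", "project", "work_name"]) "project_name") ++ chunkOf (pyIsMeaningful (b.get? "client")) (pyScanKeys b ["client_name", "customer"]) "client") ++ chunkOf (pyIsMeaningful (b.get? "category")) (pyScanKeys b ["type_of_work", "nature_of_work", "scope_of_work"]) "category") ++ chunkOf (pyIsMeaningful (b.get? "start_date")) (pyScanKeys b ["order_date", "commencement_date", "po_date"]) "start_date") ++ chunkOf (pyIsMeaningful (b.get? "end_date")) (pyScanKeys b ["completion_date", "work_completion_date"]) "end_date") ++ chunkOf (pyIsMeaningful (b.get? "value")) (pyDeriveValue b) "value") ++ chunkOf (pyIsMeaningful (b.get? "location")) (pyDeriveLocation b) "location").foldl pvIns b := by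
    rw [hg7, hdl]
    unfold chunkOf
    by_cases hm : pyIsMeaningful (b.get? "location") = true
    · simp [hm]
    · simp only [Bool.not_eq_true] at hm
      cases hl : pyDeriveLocation b with
      | none => simp [pyIsMeaningful]
      | some w =>
        have hmw := pyDeriveLocation_meaningful _ _ hl
        simp [hm, hmw, List.foldl_append, pvIns]
  rw [e7]
  unfold updatesOf
  simp only [List.append_assoc]

-- ===== B-side lemmas =====

-- A's fallback key tuple for each target (the self keys "value"/"location" excluded; A only
-- reaches them when they are not meaningful, so they can never be the scan result)
def ksOf : String → List String
  | "project_name" => ["name_of_project", "project", "work_name"]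
  | "client" => ["client_name", "customer"]
  | "category" => ["type_of_work", "nature_of_work", "scope_of_work"]
  | "start_date" => ["order_date", "commencement_date", "po_date"]
  | "end_date" => ["completion_date", "work_completion_date"]
  | "value" => ["project_value", "contract_value", "value_of_work_order",
                "work_order_value", "volume_of_work"]
  | "location" => ["site_location"]
  | _ => []

-- first meaningful candidate of ks in b, with its index
def scanIdx (b : PySem.Dict String String) : List String → Option (Nat × String)
  | [] => none
  | k :: ks =>
    if pyIsMeaningful (b.get? k) then some (0, (b.get? k).getD "")
    else (scanIdx b ks).map (fun p => (p.1 + 1, p.2))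

-- the contribution of one record item to target t in B's scan pass
def contrib (t : String) (kv : String × String) : Option (Nat × String) :=
  match altAliases.get? kv.1 with
  | some tr => if (!(PySem.Str.strip kv.2 == "") && (tr.1 == t)) then some (tr.2, kv.2) else none
  | none => none

def optStep (a : Option (Nat × String)) (p : Nat × String) : Option (Nat × String) :=
  match a with
  | none => some p
  | some q => if p.1 < q.1 then some p else a

lemma altMean_eq : altMean = pyIsMeaningful := by
  funext v; cases v <;> rfl

lemma pyScanKeys_eq_scanIdx (b : PySem.Dict String String) (ks : List String) :
    pyScanKeys b ks = (scanIdx b ks).map Prod.snd := by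
  induction ks with
  | nil => rfl
  | cons k rest ih =>
    simp only [pyScanKeys, scanIdx]
    by_cases hm : pyIsMeaningful (b.get? k) = true
    · rw [if_pos hm, if_pos hm]
      cases hg : b.get? k with
      | none => rw [hg] at hm; simp [pyIsMeaningful] at hm
      | some v => simp
    · rw [if_neg hm, if_neg hm, ih, Option.map_map]
      rfl

lemma scanIdx_none (b : PySem.Dict String String) (ks : List String)
    (h : scanIdx b ks = none) :
    ∀ j, j < ks.length → pyIsMeaningful (b.get? (ks.getD j "")) = false := by
  induction ks with
  | nil => intro j hj; simp at hj
  | cons k rest ih =>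
    intro j hj
    simp only [scanIdx] at h
    by_cases hm : pyIsMeaningful (b.get? k) = true
    · rw [if_pos hm] at h; exact absurd h (by simp)
    · rw [if_neg hm] at h
      have hrest : scanIdx b rest = none := by
        cases hr : scanIdx b rest with
        | none => rfl
        | some p => rw [hr] at h; simp at h
      cases j with
      | zero => simpa using hm
      | succ j => exact ih hrest j (by simpa using hj)

lemma scanIdx_some (b : PySem.Dict String String) (ks : List String) (i : Nat) (v : String)
    (h : scanIdx b ks = some (i, v)) :
    i < ks.length ∧ b.get? (ks.getD i "") = some v ∧ pyIsMeaningful (some v) = true ∧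
      ∀ j, j < i → pyIsMeaningful (b.get? (ks.getD j "")) = false := by
  induction ks generalizing i with
  | nil => simp [scanIdx] at h
  | cons k rest ih =>
    simp only [scanIdx] at h
    by_cases hm : pyIsMeaningful (b.get? k) = true
    · rw [if_pos hm] at h
      cases hg : b.get? k with
      | none => rw [hg] at hm; simp [pyIsMeaningful] at hm
      | some w =>
        rw [hg] at h hm
        simp only [Option.getD_some, Option.some.injEq, Prod.mk.injEq] at h
        obtain ⟨hi, hv⟩ := h
        subst hi; subst hv
        exact ⟨by simp, by simpa using hg, hm, fun j hj => by omega⟩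
    · rw [if_neg hm] at h
      cases hr : scanIdx b rest with
      | none => rw [hr] at h; simp at h
      | some p =>
        rw [hr] at h
        simp only [Option.map_some, Option.some.injEq, Prod.mk.injEq] at h
        obtain ⟨hi, hv⟩ := h
        obtain ⟨h1, h2, h3, h4⟩ := ih p.1
          (by rw [hr, show p = (p.1, v) from Prod.ext rfl hv])
        subst hi
        refine ⟨by simpa using h1, by simpa using h2, h3, ?_⟩
        intro j hj
        cases j with
        | zero => simpa using hm
        | succ j => exact h4 j (by omega)

lemma alias_char (k t : String) (r : Nat) (h : altAliases.get? k = some (t, r)) :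
    r < (ksOf t).length ∧ (ksOf t).getD r "" = k := by
  have hm := PySem.Dict.mem_items_of_get?_eq_some altAliases h
  have hm2 : (k, (t, r)) ∈ altAliasList := hm
  fin_cases hm2 <;> decide

lemma alias_fwd (t : String) (ht : t ∈ altOrder) (r : Nat) (hr : r < (ksOf t).length) :
    altAliases.get? ((ksOf t).getD r "") = some (t, r) := by
  fin_cases ht
  · rw [show (ksOf "project_name").length = 3 from rfl] at hr
    interval_cases r <;> decide
  · rw [show (ksOf "client").length = 2 from rfl] at hr
    interval_cases r <;> decide
  · rw [show (ksOf "category").length = 3 from rfl] at hr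
    interval_cases r <;> decide
  · rw [show (ksOf "start_date").length = 3 from rfl] at hr
    interval_cases r <;> decide
  · rw [show (ksOf "end_date").length = 2 from rfl] at hr
    interval_cases r <;> decide
  · rw [show (ksOf "value").length = 5 from rfl] at hr
    interval_cases r <;> decide
  · rw [show (ksOf "location").length = 1 from rfl] at hr
    interval_cases r
    decide

-- projection of B's scan pass onto one target
lemma scan_best_proj (t : String) (l : List (String × String)) :
    ∀ st, ((l.foldl altScanStep st).1).get? t
      = (l.filterMap (contrib t)).foldl optStep (st.1.get? t) := by
  induction l with
  | nil => intro st; rfl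
  | cons kv rest ih =>
    intro st
    simp only [List.foldl_cons]
    rw [ih]
    have hfst : (altScanStep st kv).1
        = (if !(PySem.Str.strip kv.2 == "") then
            match altAliases.get? kv.1 with
            | some tr =>
              match st.1.get? tr.1 with
              | none => st.1.insert tr.1 (tr.2, kv.2)
              | some rv => if tr.2 < rv.1 then st.1.insert tr.1 (tr.2, kv.2) else st.1
            | none => st.1
          else st.1) := by
      unfold altScanStep
      split_ifs <;> rfl
    have hbridge : ((altScanStep st kv).1).get? t
        = match contrib t kv with
          | none => st.1.get? t
          | some p => optStep (st.1.get? t) p := by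
      rw [hfst]
      unfold contrib
      by_cases hs : (PySem.Str.strip kv.2 == "") = true
      · simp only [hs, Bool.not_true, Bool.false_eq_true, if_false, Bool.false_and]
        cases altAliases.get? kv.1 <;> simp
      · simp only [Bool.not_eq_true] at hs
        simp only [hs, Bool.not_false, if_true, Bool.true_and]
        cases ha : altAliases.get? kv.1 with
        | none => rfl
        | some tr =>
          dsimp only
          by_cases htr : (tr.1 == t) = true
          · have htr' : tr.1 = t := eq_of_beq htr
            rw [if_pos htr]
            cases hg : st.1.get? tr.1 with
            | none =>
              rw [htr'] at hg
              simp [PySem.Dict.get?_insert_self, htr', hg, optStep]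
            | some rv =>
              rw [htr'] at hg
              by_cases hlt : tr.2 < rv.1
              · simp [hlt, PySem.Dict.get?_insert_self, htr', hg, optStep]
              · simp [hlt, hg, optStep]
          · rw [if_neg (by simpa using htr)]
            have htr' : t ≠ tr.1 := fun he => htr (by simp [he])
            cases st.1.get? tr.1 with
            | none => simp [PySem.Dict.get?_insert_of_ne _ _ htr']
            | some rv =>
              by_cases hlt : tr.2 < rv.1
              · simp [hlt, PySem.Dict.get?_insert_of_ne _ _ htr']
              · simp [hlt]
    rw [hbridge]
    simp only [List.filterMap_cons]
    cases contrib t kv with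
    | none => rfl
    | some p => rfl

lemma foldl_optStep_eq_none (s : List (Nat × String)) :
    ∀ a, s.foldl optStep a = none → s = [] ∧ a = none := by
  induction s with
  | nil => intro a h; exact ⟨rfl, h⟩
  | cons p rest ih =>
    intro a h
    simp only [List.foldl_cons] at h
    obtain ⟨h1, h2⟩ := ih _ h
    cases a with
    | none => simp [optStep] at h2
    | some q =>
      simp only [optStep] at h2
      split_ifs at h2

lemma foldl_optStep_mem (s : List (Nat × String)) :
    ∀ a p, s.foldl optStep a = some p → p ∈ s ∨ a = some p := by
  induction s with
  | nil => intro a p h; exact Or.inr h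
  | cons q rest ih =>
    intro a p h
    simp only [List.foldl_cons] at h
    rcases ih _ p h with h1 | h1
    · exact Or.inl (by simp [h1])
    · cases a with
      | none =>
        simp only [optStep] at h1
        exact Or.inl (by simp [Option.some.inj h1])
      | some q0 =>
        simp only [optStep] at h1
        split_ifs at h1 with hlt
        · exact Or.inl (by simp [Option.some.inj h1])
        · exact Or.inr h1

lemma foldl_optStep_min (s : List (Nat × String)) :
    ∀ a p, s.foldl optStep a = some p →
      (∀ q ∈ s, p.1 ≤ q.1) ∧ (∀ q, a = some q → p.1 ≤ q.1) := by
  induction s with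
  | nil =>
    intro a p h
    simp only [List.foldl_nil] at h
    refine ⟨by simp, fun q hq => ?_⟩
    rw [h] at hq
    exact le_of_eq (congrArg Prod.fst (Option.some.inj hq))
  | cons r rest ih =>
    intro a p h
    simp only [List.foldl_cons] at h
    obtain ⟨h1, h2⟩ := ih _ p h
    have hr : p.1 ≤ r.1 := by
      cases a with
      | none => exact h2 r rfl
      | some q0 =>
        by_cases hlt : r.1 < q0.1
        · exact h2 r (by simp [optStep, hlt])
        · have := h2 q0 (by simp [optStep, hlt])
          omega
    refine ⟨fun q hq => ?_, fun q hq => ?_⟩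
    · rcases List.mem_cons.mp hq with rfl | hq'
      · exact hr
      · exact h1 q hq'
    · subst hq
      by_cases hlt : r.1 < q.1
      · have := h2 r (by simp [optStep, hlt])
        omega
      · exact h2 q (by simp [optStep, hlt])

-- B's min-rank winner for target t IS A's first-meaningful-candidate scan
lemma best_eq_scan (b : PySem.Dict String String) (hnod : b.keys.Nodup)
    (t : String) (ht : t ∈ altOrder) :
    (b.items.filterMap (contrib t)).foldl optStep none = scanIdx b (ksOf t) := by
  have hitem : ∀ kv ∈ b.items, ∀ p, contrib t kv = some p →
      p.1 < (ksOf t).length ∧ b.get? ((ksOf t).getD p.1 "") = some kv.2 ∧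
        pyIsMeaningful (some kv.2) = true ∧ p.2 = kv.2 := by
    intro kv hkv p hp
    unfold contrib at hp
    cases ha : altAliases.get? kv.1 with
    | none => rw [ha] at hp; simp at hp
    | some tr =>
      rw [ha] at hp
      dsimp only at hp
      by_cases hc : (!(PySem.Str.strip kv.2 == "") && (tr.1 == t)) = true
      · rw [if_pos hc] at hp
        simp only [Option.some.injEq] at hp
        simp only [Bool.and_eq_true] at hc
        have htr : tr.1 = t := eq_of_beq hc.2
        obtain ⟨hr, hkr⟩ := alias_char kv.1 t tr.2
          (by rw [ha]; exact congrArg some (Prod.ext htr rfl))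
        have hget : b.get? kv.1 = some kv.2 := PySem.Dict.get?_of_mem_items b hkv hnod
        refine ⟨by rw [← hp]; exact hr, by rw [← hp]; dsimp only; rw [hkr]; exact hget, ?_,
          by rw [← hp]⟩
        simpa [pyIsMeaningful] using hc.1
      · rw [if_neg hc] at hp; simp at hp
  cases hs : scanIdx b (ksOf t) with
  | none =>
    have hempty : b.items.filterMap (contrib t) = [] := by
      rw [List.filterMap_eq_nil_iff]
      intro kv hkv
      cases hp : contrib t kv with
      | none => rfl
      | some p =>
        obtain ⟨h1, h2, h3, _⟩ := hitem kv hkv p hp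
        have := scanIdx_none b (ksOf t) hs p.1 h1
        rw [h2] at this
        rw [h3] at this
        exact absurd this (by simp)
    rw [hempty]; rfl
  | some iv =>
    obtain ⟨hi, hv, hmv, hmin⟩ := scanIdx_some b (ksOf t) iv.1 iv.2 (by rw [hs])
    have hmem : iv ∈ b.items.filterMap (contrib t) := by
      rw [List.mem_filterMap]
      refine ⟨((ksOf t).getD iv.1 "", iv.2), PySem.Dict.mem_items_of_get?_eq_some b hv, ?_⟩
      unfold contrib
      rw [alias_fwd t ht iv.1 hi]
      dsimp only
      have : (!(PySem.Str.strip iv.2 == "") && (t == t)) = true := by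
        simp only [beq_self_eq_true, Bool.and_true]
        simpa [pyIsMeaningful] using hmv
      rw [if_pos this]
    cases hf : (b.items.filterMap (contrib t)).foldl optStep none with
    | none =>
      obtain ⟨he, -⟩ := foldl_optStep_eq_none _ _ hf
      rw [he] at hmem; simp at hmem
    | some p =>
      obtain ⟨hps, -⟩ := List.mem_filterMap.mp
        ((foldl_optStep_mem _ _ _ hf).resolve_right (by simp))
      obtain ⟨kv, hkv, hcp⟩ := List.mem_filterMap.mp
        ((foldl_optStep_mem _ _ _ hf).resolve_right (by simp))
      obtain ⟨h1, h2, h3, h4⟩ := hitem kv hkv p hcp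
      have hle : p.1 ≤ iv.1 := (foldl_optStep_min _ _ _ hf).1 iv hmem
      have hge : iv.1 ≤ p.1 := by
        by_contra hlt
        rw [Nat.not_le] at hlt
        have := hmin p.1 hlt
        rw [h2] at this
        rw [h3] at this
        exact absurd this (by simp)
      have hpi : p.1 = iv.1 := by omega
      have hv2 : p.2 = iv.2 := by
        rw [h4]
        rw [hpi] at h2
        rw [hv] at h2
        exact (Option.some.injEq _ _ ▸ h2).symm
      rw [show p = iv from Prod.ext hpi hv2]

-- city/state capture: projection of the scan pass
lemma scan_city_proj (l : List (String × String)) :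
    ∀ st, (l.foldl altScanStep st).2.1
      = l.foldl (fun c kv => if kv.1 == "city" then some kv.2 else c) st.2.1 := by
  induction l with
  | nil => intro st; rfl
  | cons kv rest ih =>
    intro st
    simp only [List.foldl_cons]
    rw [ih]
    congr 1
    unfold altScanStep
    by_cases h1 : (kv.1 == "city") = true
    · simp [h1]
    · by_cases h2 : (kv.1 == "state") = true <;> simp [h1, h2]

lemma scan_state_proj (l : List (String × String)) :
    ∀ st, (l.foldl altScanStep st).2.2
      = l.foldl (fun c kv => if kv.1 == "state" then some kv.2 else c) st.2.2 := by
  induction l with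
  | nil => intro st; rfl
  | cons kv rest ih =>
    intro st
    simp only [List.foldl_cons]
    rw [ih]
    congr 1
    unfold altScanStep
    by_cases h1 : (kv.1 == "city") = true
    · have h2 : (kv.1 == "state") = false := by
        rw [eq_of_beq h1]; decide
      simp [h1, h2]
    · by_cases h2 : (kv.1 == "state") = true <;> simp [h1, h2]

lemma capture_none (k : String) (l : List (String × String))
    (h : ∀ kv ∈ l, kv.1 ≠ k) :
    ∀ a, l.foldl (fun c kv => if kv.1 == k then some kv.2 else c) a = a := by
  induction l with
  | nil => intro a; rfl
  | cons kv rest ih =>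
    intro a
    simp only [List.foldl_cons]
    rw [if_neg (by simpa using h kv (by simp))]
    exact ih (fun kv hkv => h kv (by simp [hkv])) a

lemma capture_mem (k v : String) (l : List (String × String))
    (hn : (l.map Prod.fst).Nodup) (hm : (k, v) ∈ l) :
    ∀ a, l.foldl (fun c kv => if kv.1 == k then some kv.2 else c) a = some v := by
  induction l with
  | nil => simp at hm
  | cons kv rest ih =>
    intro a
    simp only [List.map_cons, List.nodup_cons] at hn
    simp only [List.foldl_cons]
    by_cases hk : kv.1 = k
    · have hnot : ∀ kv' ∈ rest, kv'.1 ≠ k := by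
        intro kv' hkv' he
        apply hn.1
        rw [hk, ← he]
        exact List.mem_map_of_mem hkv'
      rw [if_pos (by simpa using hk), capture_none k rest hnot]
      rcases List.mem_cons.mp hm with he | hrest
      · rw [← he]
      · exact absurd (show kv.1 ∈ rest.map Prod.fst by
          rw [hk]; exact List.mem_map_of_mem hrest) hn.1
    · rw [if_neg (by simpa using hk)]
      rcases List.mem_cons.mp hm with he | hrest
      · exact absurd (congrArg Prod.fst he).symm hk
      · exact ih hn.2 hrest a

lemma capture_get (b : PySem.Dict String String) (hnod : b.keys.Nodup) (k : String) :
    b.items.foldl (fun c kv => if kv.1 == k then some kv.2 else c) none = b.get? k := by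
  have hn : (b.items.map Prod.fst).Nodup := hnod
  cases hg : b.get? k with
  | some v => exact capture_mem k v b.items hn (PySem.Dict.mem_items_of_get?_eq_some b hg) none
  | none =>
    apply capture_none
    intro kv hkv he
    have : k ∈ b.keys := he ▸ (List.mem_map_of_mem hkv : kv.1 ∈ b.items.map Prod.fst)
    rw [PySem.Dict.get?_eq_none_iff_not_mem_keys] at hg
    exact hg this

-- the per-target pieces of A's update list, indexed by target
def Xof (b : PySem.Dict String String) (t : String) : Option String :=
  if t == "value" then pyDeriveValue b
  else if t == "location" then pyDeriveLocation b
  else pyScanKeys b (ksOf t)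

def chunk1 (b : PySem.Dict String String) (t : String) : List (String × String) :=
  chunkOf (pyIsMeaningful (b.get? t)) (Xof b t) t

lemma updatesOf_eq_flatMap (b : PySem.Dict String String) :
    updatesOf b = altOrder.flatMap (chunk1 b) := by
  simp [updatesOf, altOrder, chunk1, Xof, ksOf, List.append_assoc]

lemma pyScanKeys_cons_notmean (b : PySem.Dict String String) (k : String) (ks : List String)
    (h : pyIsMeaningful (b.get? k) = false) :
    pyScanKeys b (k :: ks) = pyScanKeys b ks := by
  simp [pyScanKeys, h]

lemma altApply_step (b : PySem.Dict String String)
    (best : PySem.Dict String (Nat × String)) (city state : Option String)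
    (hbest : ∀ t ∈ altOrder, best.get? t = scanIdx b (ksOf t))
    (hcity : city = b.get? "city") (hstate : state = b.get? "state")
    (t : String) (ht : t ∈ altOrder) (U : List (String × String))
    (hU : t ∉ U.map Prod.fst) :
    altApply best city state (U.foldl pvIns b) t = (U ++ chunk1 b t).foldl pvIns b := by
  have hres : (U.foldl pvIns b).get? t = b.get? t := get?_foldl_pvIns U b t hU
  unfold altApply chunk1
  rw [altMean_eq, hres]
  by_cases hm : pyIsMeaningful (b.get? t) = true
  · simp [hm, chunkOf]
  · simp only [Bool.not_eq_true] at hm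
    rw [hm]
    simp only [Bool.false_eq_true, if_false, chunkOf]
    rw [hbest t ht]
    by_cases hloc : t = "location"
    · subst hloc
      have hX : Xof b "location" = pyDeriveLocation b := rfl
      rw [hX]
      have hscan2 : pyScanKeys b ["location", "site_location"] = pyScanKeys b ["site_location"] :=
        pyScanKeys_cons_notmean b "location" ["site_location"] hm
      have hks : ksOf "location" = ["site_location"] := rfl
      rw [hks]
      cases hs : scanIdx b ["site_location"] with
      | some rv =>
        have hps : pyScanKeys b ["site_location"] = some rv.2 := by
          rw [pyScanKeys_eq_scanIdx, hs]; rfl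
        have hderiv : pyDeriveLocation b = some rv.2 := by
          unfold pyDeriveLocation
          rw [hscan2, hps]
        rw [hderiv]
        simp [List.foldl_append, pvIns]
      | none =>
        have hps : pyScanKeys b ["site_location"] = none := by
          rw [pyScanKeys_eq_scanIdx, hs]; rfl
        have hderiv : pyDeriveLocation b
            = (let cityText := pySafeText (b.get? "city")
               let stateText := pySafeText (b.get? "state")
               if !(cityText == "") && !(stateText == "") then some (cityText ++ ", " ++ stateText)
               else if !(cityText == "") then some cityText
               else if !(stateText == "") then some stateText
               else none) := by
          unfold pyDeriveLocation
          rw [hscan2, hps]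
        rw [hderiv]
        have hc : altStripOpt city = pySafeText (b.get? "city") := by
          rw [hcity]; cases b.get? "city" <;> rfl
        have hs2 : altStripOpt state = pySafeText (b.get? "state") := by
          rw [hstate]; cases b.get? "state" <;> rfl
        simp only [hc, hs2]
        set c := pySafeText (b.get? "city")
        set s := pySafeText (b.get? "state")
        by_cases h1 : (!(c == "") && !(s == "")) = true
        · simp [h1, List.foldl_append, pvIns]
        · rw [if_neg h1, if_neg h1]
          by_cases h2 : (c == "") = true
          · simp only [h2, Bool.not_true, Bool.false_eq_true, if_false]
            by_cases h3 : (s == "") = true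
            · simp [h3]
            · simp [h3, List.foldl_append, pvIns]
          · simp only [Bool.not_eq_true] at h2
            simp [h2, List.foldl_append, pvIns]
    · have hX : Xof b t = pyScanKeys b (ksOf t) := by
        unfold Xof
        by_cases hv : t = "value"
        · subst hv
          have hcond : (("value" == "value") = true) := rfl
          rw [if_pos hcond]
          unfold pyDeriveValue
          rw [show ksOf "value" = ["project_value", "contract_value", "value_of_work_order",
            "work_order_value", "volume_of_work"] from rfl]
          exact pyScanKeys_cons_notmean b "value" _ hm
        · rw [if_neg (by simpa using hv), if_neg (by simpa using hloc)]
      rw [hX, pyScanKeys_eq_scanIdx]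
      cases hs : scanIdx b (ksOf t) with
      | some rv => simp [List.foldl_append, pvIns]
      | none => simp [hloc]

lemma fold_altApply (b : PySem.Dict String String)
    (best : PySem.Dict String (Nat × String)) (city state : Option String)
    (hbest : ∀ t ∈ altOrder, best.get? t = scanIdx b (ksOf t))
    (hcity : city = b.get? "city") (hstate : state = b.get? "state") :
    ∀ ts : List String, ts.Nodup → (∀ t ∈ ts, t ∈ altOrder) →
    ∀ U : List (String × String), (∀ t ∈ ts, t ∉ U.map Prod.fst) →
    ts.foldl (altApply best city state) (U.foldl pvIns b)
      = (U ++ ts.flatMap (chunk1 b)).foldl pvIns b := by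
  intro ts
  induction ts with
  | nil => intro _ _ U _; simp
  | cons t rest ih =>
    intro hnd hmem U hdisj
    simp only [List.foldl_cons, List.nodup_cons] at hnd ⊢
    rw [altApply_step b best city state hbest hcity hstate t (hmem t (by simp)) U
        (hdisj t (by simp))]
    rw [ih hnd.2 (fun t' ht' => hmem t' (by simp [ht'])) (U ++ chunk1 b t) ?_]
    · simp [List.flatMap_cons, List.append_assoc]
    · intro t' ht'
      rw [List.map_append, List.mem_append]
      rintro (h | h)
      · exact hdisj t' (by simp [ht']) h
      · have := (fst_chunkOf_sublist (pyIsMeaningful (b.get? t)) (Xof b t) t).subset h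
        simp only [List.mem_singleton] at this
        exact hnd.1 (this ▸ ht')

lemma alt_eq (project : List (String × String)) :
    normalize_project_record_py_alt project =
      ((updatesOf (project.foldl (fun d kv => d.insert kv.1 kv.2) PySem.Dict.empty)).foldl pvIns
        (project.foldl (fun d kv => d.insert kv.1 kv.2) PySem.Dict.empty)).items := by
  unfold normalize_project_record_py_alt
  set b := project.foldl (fun d kv => d.insert kv.1 kv.2) (PySem.Dict.empty : PySem.Dict String String) with hb
  dsimp only
  have hnod : b.keys.Nodup := by
    rw [hb]
    exact PySem.Dict.nodup_keys_foldl_insert_key project Prod.fst (fun d kv => kv.2)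
      PySem.Dict.empty PySem.Dict.nodup_keys_empty
  set st := b.items.foldl altScanStep
      ((PySem.Dict.empty : PySem.Dict String (Nat × String)), (none : Option String),
        (none : Option String)) with hst
  have hbest : ∀ t ∈ altOrder, st.1.get? t = scanIdx b (ksOf t) := by
    intro t ht
    rw [hst, scan_best_proj t b.items]
    exact best_eq_scan b hnod t ht
  have hcity : st.2.1 = b.get? "city" := by
    rw [hst, scan_city_proj b.items]
    exact capture_get b hnod "city"
  have hstate : st.2.2 = b.get? "state" := by
    rw [hst, scan_state_proj b.items]
    exact capture_get b hnod "state"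
  have := fold_altApply b st.1 st.2.1 st.2.2 hbest hcity hstate altOrder
    (by decide) (fun t ht => ht) [] (by simp)
  simp only [List.foldl_nil, List.nil_append] at this
  rw [this, updatesOf_eq_flatMap]

-- ===== VERDICT (by name: the statement is the Claim_ definition above) =====
theorem normalize_project_record_py_spec : Claim_equal_normalize_project_record_py := by
  intro project _
  unfold Spec_normalize_project_record_py
  rw [chain_eq, alt_eq]
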